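-- pv_equiv track=rewrite | github.com/codingjerk/dotfiles | tools/motd.py | get_fillers_for_table
-- ===== SOURCE A (Python) =====
-- from typing import Any, Callable, List, Optional
--
-- def term_length(line: str) -> int:
--     action = 'COUNT'
--     counter = 0
--
--     for char in line:
--         if action == 'COUNT' and char == '\u001B':
--             action = 'SKIP'
--         elif action == 'SKIP' and char == 'm':
--             action = 'COUNT'
--         elif action == 'COUNT':
--             counter += 1
--
--     return counter
--
-- def get_fillers_for_table(table: List[List[str]]) -> List[List[str]]:
--     if not (table_rows := len(table)):
--         return []
--
--     if not (table_columns := len(table[0])):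
--         return []
--
--     fillers = [["" for _ in range(table_columns)] for _ in range(table_rows)]
--
--     for column in range(table_columns):
--         max_cell_in_column = 0
--
--         for row in range(table_rows):
--             cell = table[row][column]
--             cell_length = term_length(cell)
--
--             max_cell_in_column = max(max_cell_in_column, cell_length)
--
--         for row in range(table_rows):
--             cell = table[row][column]
--             cell_length = term_length(cell)
--
--             filler_length = max_cell_in_column - cell_length
--             fillers[row][column] = ' ' * filler_length
--
--     return fillers
-- ===== SOURCE B (Python) =====
-- def visible_len(line: str) -> int:
--     # visible width: total length minus characters hidden inside ESC..m sequences,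
--     # computed by splitting on ESC and trimming each fragment up to its first 'm'
--     parts = line.split('\u001B')
--     total = len(parts[0])
--     for p in parts[1:]:
--         i = p.find('m')
--         if i != -1:
--             total += len(p) - i - 1
--     return total
--
-- def get_fillers_for_table(table):
--     if not table or not table[0]:
--         return []
--     ncols = len(table[0])
--     widths = [[visible_len(row[c]) for c in range(ncols)] for row in table]
--     maxes = [0] * ncols
--     for wrow in widths:
--         maxes = [w if w > m else m for m, w in zip(maxes, wrow)]
--     return [[' ' * (m - w) for m, w in zip(maxes, wrow)] for wrow in widths]
-- ===== Notes on version B (the rewrite author's own statement) =====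
-- stated objective: faster
-- what changed: B replaces A's per-character escape-state machine with a split-on-ESC width computation (each fragment after an ESC contributes only what follows its first 'm') and replaces A's column-major double scan (term_length called twice per cell) with one widths matrix plus a single row-major zip-fold accumulating all column maxima at once.
import Mathlib
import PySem

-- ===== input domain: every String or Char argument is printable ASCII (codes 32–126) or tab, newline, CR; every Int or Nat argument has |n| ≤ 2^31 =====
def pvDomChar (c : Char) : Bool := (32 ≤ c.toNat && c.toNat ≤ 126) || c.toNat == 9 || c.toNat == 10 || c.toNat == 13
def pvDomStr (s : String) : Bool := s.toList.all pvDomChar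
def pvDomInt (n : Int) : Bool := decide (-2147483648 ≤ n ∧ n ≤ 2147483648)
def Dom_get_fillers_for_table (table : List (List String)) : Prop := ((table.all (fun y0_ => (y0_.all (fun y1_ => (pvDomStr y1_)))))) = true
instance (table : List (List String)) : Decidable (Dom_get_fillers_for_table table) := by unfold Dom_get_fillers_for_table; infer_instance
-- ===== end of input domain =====

-- B computes each cell's visible width by splitting on ESC and trimming each fragment at its
-- first 'm' (instead of A's per-char state machine), and accumulates the column maxima in one
-- row-major pass over a widths matrix (instead of A's column-major double scan); return values only.

-- ===== PORT A =====
-- term_length: A's per-character escape-state machine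
def termLength (line : String) : Int :=
  (line.toList.foldl
    (fun (st : String × Int) ch =>
      if st.1 = "COUNT" ∧ ch = '\u001B' then ("SKIP", st.2)
      else if st.1 = "SKIP" ∧ ch = 'm' then ("COUNT", st.2)
      else if st.1 = "COUNT" then (st.1, st.2 + 1)
      else st)
    ("COUNT", (0 : Int))).2

-- A's first inner loop: running max of term_length over the rows of one column
def A_maxInColumn (table : List (List String)) (column : Int) : Int :=
  (PySem.List.pyRange 0 (table.length : Int) 1).foldl
    (fun maxCell row =>
      max maxCell (termLength (PySem.List.pyGetD (PySem.List.pyGetD table row []) column "")))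
    0

-- A's second inner loop: write the filler of each row of one column into the matrix
def A_fillColumn (table : List (List String)) (column : Int) (maxCell : Int)
    (fillers : List (List String)) : List (List String) :=
  (PySem.List.pyRange 0 (table.length : Int) 1).foldl
    (fun fillers row =>
      PySem.List.pySetD fillers row
        (PySem.List.pySetD (PySem.List.pyGetD fillers row []) column
          (String.ofList (List.replicate
            ((maxCell - termLength (PySem.List.pyGetD (PySem.List.pyGetD table row []) column "")).toNat) ' '))))
    fillers

def get_fillers_for_table (table : List (List String)) : List (List String) :=
  let table_rows : Int := (table.length : Int)
  if table_rows = 0 then []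
  else
    let table_columns : Int := ((PySem.List.pyGetD table 0 []).length : Int)
    if table_columns = 0 then []
    else
      let fillers :=
        (PySem.List.pyRange 0 table_rows 1).map
          (fun _ => (PySem.List.pyRange 0 table_columns 1).map (fun _ => ""))
      (PySem.List.pyRange 0 table_columns 1).foldl
        (fun fillers column => A_fillColumn table column (A_maxInColumn table column) fillers)
        fillers

-- ===== PORT B =====
-- Source B's visible_len: split on ESC, first fragment counts whole, later fragments count
-- only what follows their first 'm' (the match is a totality guard: split is never empty)
def visibleLen (line : String) : Int :=
  match PySem.Chars.splitOn line.toList ['\u001B'] with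
  | [] => 0
  | p0 :: rest =>
    rest.foldl
      (fun tot p =>
        let i := PySem.Chars.find p ['m']
        if i ≠ -1 then tot + ((p.length : Int) - i - 1) else tot)
      ((p0.length : Int))

def get_fillers_for_table_alt (table : List (List String)) : List (List String) :=
  match table with
  | [] => []
  | r0 :: _ =>
    if r0 = [] then []
    else
      let ncols : Int := (r0.length : Int)
      let widths :=
        table.map (fun row =>
          (PySem.List.pyRange 0 ncols 1).map (fun c => visibleLen (PySem.List.pyGetD row c "")))
      let maxes :=
        widths.foldl
          (fun mx wrow => (mx.zip wrow).map (fun mw => if mw.2 > mw.1 then mw.2 else mw.1))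
          (List.replicate r0.length (0 : Int))
      widths.map (fun wrow =>
        (maxes.zip wrow).map (fun mw => String.ofList (List.replicate (mw.1 - mw.2).toNat ' ')))

-- ===== PRECONDITION & SPEC =====
-- Pre_ excludes ragged tables (some row shorter than the first row): there Python A raises
-- IndexError, and Python B raises IndexError on the same inputs.
def Pre_get_fillers_for_table (table : List (List String)) : Prop :=
  ∀ r ∈ table, (table.headD []).length ≤ r.length
instance (table : List (List String)) : Decidable (Pre_get_fillers_for_table table) := by
  unfold Pre_get_fillers_for_table; infer_instance

def pvWitness_get_fillers_for_table : List (List String) := [["ab", "c"], ["d", "efg"]]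

def Spec_get_fillers_for_table (table : List (List String)) (out : List (List String)) : Prop := out = get_fillers_for_table_alt table
instance (table : List (List String)) (out : List (List String)) : Decidable (Spec_get_fillers_for_table table out) := by unfold Spec_get_fillers_for_table; infer_instance

-- ===== CLAIM (what is proved, stated in full; the proofs are below) =====
def Claim_equal_get_fillers_for_table : Prop := ∀ (table : List (List String)), Dom_get_fillers_for_table table → Pre_get_fillers_for_table table → Spec_get_fillers_for_table table (get_fillers_for_table table)

-- ===== LEMMAS AND PROOFS =====

-- ---- B's visible_len equals A's term_length ----

-- reference form of splitting a char list on ESC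
def escSplit : List Char → List (List Char)
  | [] => [[]]
  | c :: cs =>
    if c = '\u001B' then [] :: escSplit cs
    else
      match escSplit cs with
      | [] => [[c]]
      | p :: ps => (c :: p) :: ps

theorem escSplit_ne_nil (cs : List Char) : escSplit cs ≠ [] := by
  cases cs with
  | nil => simp [escSplit]
  | cons c cs =>
    simp only [escSplit]
    split_ifs
    · simp
    · cases h : escSplit cs <;> simp

-- reference form of p.find(c) for a single character
def findC : List Char → Char → Int
  | [], _ => -1
  | x :: xs, c => if x = c then 0 else (let r := findC xs c; if r = -1 then -1 else r + 1)

theorem neg_one_le_findC (s : List Char) (c : Char) : -1 ≤ findC s c := by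
  induction s with
  | nil => simp [findC]
  | cons x xs ih => simp only [findC]; split_ifs <;> omega

theorem findgo_eq (c : Char) : ∀ (s : List Char) (k : Nat),
    PySem.Chars.find.go [c] s k = if findC s c = -1 then -1 else (k : Int) + findC s c := by
  intro s
  induction s with
  | nil => intro k; simp [PySem.Chars.find.go, findC]
  | cons x xs ih =>
    intro k
    rw [PySem.Chars.find.go]
    by_cases hx : x = c
    · simp [hx, List.isPrefixOf, findC]
    · have hpre : [c].isPrefixOf (x :: xs) = false := by
        simp [List.isPrefixOf]; exact fun h => hx h.symm
      have hle := neg_one_le_findC xs c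
      simp only [hpre, Bool.false_eq_true, if_false, ih, findC, hx, if_false]
      by_cases h0 : findC xs c = -1
      · simp [h0]
      · rw [if_neg h0, if_neg (by omega), if_neg (by omega)]
        push_cast; ring

theorem find_single (c : Char) (s : List Char) :
    PySem.Chars.find s [c] = if findC s c = -1 then -1 else findC s c := by
  simpa [PySem.Chars.find] using findgo_eq c s 0

def consHead (pre : List Char) : List (List Char) → List (List Char)
  | [] => [pre]
  | p :: ps => (pre ++ p) :: ps

theorem splitOn_go_esc : ∀ (s : List Char) (fuel : Nat), s.length < fuel →
    ∀ (cur : List Char) (acc : List (List Char)),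
      PySem.Chars.splitOn.go ['\u001B'] fuel s cur acc =
        acc.reverse ++ consHead cur.reverse (escSplit s) := by
  intro s
  induction s with
  | nil =>
    intro fuel hf cur acc
    match fuel, hf with
    | fuel + 1, _ => simp [PySem.Chars.splitOn.go, escSplit, consHead]
  | cons c rest ih =>
    intro fuel hf cur acc
    match fuel, hf with
    | fuel + 1, hf =>
      rw [PySem.Chars.splitOn.go]
      by_cases hc : c = '\u001B'
      · have hpre : (['\u001B'] : List Char).isPrefixOf (c :: rest) = true := by
          simp [List.isPrefixOf, hc]
        rw [if_pos hpre]
        simp only [List.length_cons] at hf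
        have hdrop : List.drop (['\u001B'] : List Char).length (c :: rest) = rest := by simp
        rw [hdrop, ih fuel (by omega) [] (cur.reverse :: acc)]
        simp [escSplit, hc]
        cases h : escSplit rest with
        | nil => exact absurd h (escSplit_ne_nil rest)
        | cons p ps => simp [consHead]
      · have hpre : (['\u001B'] : List Char).isPrefixOf (c :: rest) = false := by
          simp [List.isPrefixOf]; exact fun h => hc h.symm
        rw [if_neg (by simp [hpre])]
        simp only [List.length_cons] at hf
        rw [ih fuel (by omega) (c :: cur) acc]
        simp only [escSplit, if_neg hc, List.reverse_cons]
        cases h : escSplit rest with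
        | nil => exact absurd h (escSplit_ne_nil rest)
        | cons p ps => simp [consHead]

theorem splitOn_esc (s : List Char) :
    PySem.Chars.splitOn s ['\u001B'] = escSplit s := by
  rw [PySem.Chars.splitOn, splitOn_go_esc s (s.length + 1) (by omega) [] []]
  simp only [List.reverse_nil, List.nil_append]
  cases h : escSplit s with
  | nil => exact absurd h (escSplit_ne_nil s)
  | cons p ps => simp [consHead]

-- visible contribution of one fragment after an ESC
def fChars (p : List Char) : Int :=
  if findC p 'm' = -1 then 0 else (p.length : Int) - findC p 'm' - 1

-- A's state-machine step
def smStep (st : String × Int) (ch : Char) : String × Int :=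
  if st.1 = "COUNT" ∧ ch = '\u001B' then ("SKIP", st.2)
  else if st.1 = "SKIP" ∧ ch = 'm' then ("COUNT", st.2)
  else if st.1 = "COUNT" then (st.1, st.2 + 1)
  else st

def visSum : List (List Char) → Int
  | [] => 0
  | p :: ps => (p.length : Int) + (ps.map fChars).sum

theorem sm_split (cs : List Char) : ∀ n : Int,
    (cs.foldl smStep ("COUNT", n)).2 = n + visSum (escSplit cs) ∧
    (cs.foldl smStep ("SKIP", n)).2 = n + ((escSplit cs).map fChars).sum := by
  induction cs with
  | nil => intro n; simp [visSum, escSplit, fChars, findC]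
  | cons c cs ih =>
    intro n
    constructor
    · by_cases hc : c = '\u001B'
      · have : smStep ("COUNT", n) c = ("SKIP", n) := by simp [smStep, hc]
        rw [List.foldl_cons, this, (ih n).2]
        simp [escSplit, hc, visSum]
      · have : smStep ("COUNT", n) c = ("COUNT", n + 1) := by
          simp [smStep, hc]
        rw [List.foldl_cons, this, (ih (n + 1)).1]
        simp only [escSplit, if_neg hc]
        cases h : escSplit cs with
        | nil => exact absurd h (escSplit_ne_nil cs)
        | cons p ps => simp [visSum]; ring
    · by_cases hc : c = '\u001B'
      · have : smStep ("SKIP", n) c = ("SKIP", n) := by simp [smStep, hc]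
        rw [List.foldl_cons, this, (ih n).2]
        simp only [escSplit, if_pos hc, List.map_cons, List.sum_cons]
        simp [fChars, findC]
      · by_cases hm : c = 'm'
        · have : smStep ("SKIP", n) c = ("COUNT", n) := by simp [smStep, hm]
          rw [List.foldl_cons, this, (ih n).1]
          simp only [escSplit, if_neg hc]
          cases h : escSplit cs with
          | nil => exact absurd h (escSplit_ne_nil cs)
          | cons p ps =>
            simp only [List.map_cons, List.sum_cons, visSum]
            have : fChars (c :: p) = (p.length : Int) := by
              simp [fChars, findC, hm]
            rw [this]
        · have : smStep ("SKIP", n) c = ("SKIP", n) := by simp [smStep, hm, hc]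
          rw [List.foldl_cons, this, (ih n).2]
          simp only [escSplit, if_neg hc]
          cases h : escSplit cs with
          | nil => exact absurd h (escSplit_ne_nil cs)
          | cons p ps =>
            simp only [List.map_cons, List.sum_cons]
            have : fChars (c :: p) = fChars p := by
              have := neg_one_le_findC p 'm'
              simp only [fChars, findC, if_neg hm]
              by_cases h0 : findC p 'm' = -1
              · simp [h0]
              · rw [if_neg h0, if_neg (by omega), if_neg h0]
                simp only [List.length_cons]; push_cast; ring
            rw [this]

theorem visibleLen_eq_termLength (line : String) : visibleLen line = termLength line := by
  have hterm : termLength line = (line.toList.foldl smStep ("COUNT", (0 : Int))).2 := rfl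
  rw [hterm, (sm_split line.toList 0).1, zero_add]
  unfold visibleLen
  rw [splitOn_esc]
  cases h : escSplit line.toList with
  | nil => exact absurd h (escSplit_ne_nil line.toList)
  | cons p0 rest =>
    have hbody : ∀ (tot : Int) (p : List Char),
        (let i := PySem.Chars.find p ['m'];
         if i ≠ -1 then tot + ((p.length : Int) - i - 1) else tot) = tot + fChars p := by
      intro tot p
      have hle := neg_one_le_findC p 'm'
      rw [find_single]
      by_cases h0 : findC p 'm' = -1
      · simp [h0, fChars]
      · simp [h0, fChars]
    calc rest.foldl
          (fun tot p =>
            let i := PySem.Chars.find p ['m'];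
            if i ≠ -1 then tot + ((p.length : Int) - i - 1) else tot)
          ((p0.length : Int))
        = rest.foldl (fun tot p => tot + fChars p) ((p0.length : Int)) :=
          PySem.List.foldl_congr_mem rest _ _ _ (fun tot p _ => hbody tot p)
      _ = (p0.length : Int) + (rest.map fChars).sum := PySem.List.foldl_add rest fChars _
      _ = visSum (p0 :: rest) := rfl

-- ---- A-side characterisation: per-entry value of A's fold ----

-- visible length of the cell at column c of a row
def gLen (row : List String) (c : Int) : Int := termLength (PySem.List.pyGetD row c "")

theorem A_maxInColumn_eq_foldl (table : List (List String)) (c : Int) :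
    A_maxInColumn table c = table.foldl (fun m rowl => max m (gLen rowl c)) 0 := by
  unfold A_maxInColumn gLen
  exact PySem.List.foldl_pyRange_zero_pyGetD' table []
    (fun m rowl => max m (termLength (PySem.List.pyGetD rowl c ""))) 0

-- the filler string A writes at row r, column c
def fillV (table : List (List String)) (r : Nat) (c : Int) : String :=
  String.ofList (List.replicate
    ((A_maxInColumn table c - gLen (PySem.List.pyGetD table (r : Int) []) c).toNat) ' ')

theorem foldl_set2 (c : Int) (hc : 0 ≤ c) (v : Int → String) :
    ∀ (L : List Int) (M : List (List String)) (r : Nat), (∀ i ∈ L, 0 ≤ i) →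
      (L.foldl (fun fil row => PySem.List.pySetD fil row
          (PySem.List.pySetD (PySem.List.pyGetD fil row []) c (v row))) M)[r]? =
        if (r : Int) ∈ L then (M[r]?).map (fun rowl => rowl.set c.toNat (v (r : Int)))
        else M[r]? := by
  obtain ⟨cN, rfl⟩ : ∃ k : Nat, c = (k : Int) := ⟨c.toNat, (Int.toNat_of_nonneg hc).symm⟩
  intro L
  induction L with
  | nil => intro M r _; simp
  | cons i L' ih =>
    intro M r hL
    have hi : 0 ≤ i := hL i (by simp)
    have hL' : ∀ j ∈ L', 0 ≤ j := fun j hj => hL j (by simp [hj])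
    obtain ⟨iN, rfl⟩ : ∃ k : Nat, i = (k : Int) := ⟨i.toNat, (Int.toNat_of_nonneg hi).symm⟩
    rw [List.foldl_cons, ih _ r hL']
    have hstep : (PySem.List.pySetD M (iN : Int)
        (PySem.List.pySetD (PySem.List.pyGetD M (iN : Int) []) (cN : Int) (v (iN : Int))))[r]? =
        if r = iN then (M[r]?).map (fun rowl => rowl.set cN (v (iN : Int))) else M[r]? := by
      simp only [PySem.List.pySetD_natCast, PySem.List.pyGetD_natCast]
      by_cases hri : r = iN
      · subst hri
        by_cases hlt : r < M.length
        · simp [hlt, List.getD_eq_getElem?_getD]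
        · simp [hlt]
      · have hir : iN ≠ r := fun h => hri h.symm
        simp [hri, hir]
    rw [hstep]
    simp only [Int.toNat_natCast, List.mem_cons, Nat.cast_inj]
    by_cases hmem : (r : Int) ∈ L' <;> by_cases hri : r = iN
    · subst hri
      cases hM : M[r]? with
      | none => simp [hmem]
      | some rowl => simp [hmem, List.set_set]
    · have hne : ¬ ((r : Int) = (iN : Int)) := by exact_mod_cast hri
      simp [hmem, hri]
    · subst hri
      simp [hmem]
    · have hne : ¬ ((r : Int) = (iN : Int)) := by exact_mod_cast hri
      simp [hmem, hri]

theorem A_fillColumn_length (table : List (List String)) (c mc : Int) (M : List (List String)) :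
    (A_fillColumn table c mc M).length = M.length := by
  unfold A_fillColumn
  generalize PySem.List.pyRange 0 (table.length : Int) 1 = L
  induction L generalizing M with
  | nil => rfl
  | cons i L' ih =>
    rw [List.foldl_cons, ih]
    simp [PySem.List.length_pySetD]

theorem A_fillColumn_getElem? (table : List (List String)) (c : Int) (hc : 0 ≤ c) (mc : Int)
    (M : List (List String)) (hM : M.length = table.length) (r : Nat) :
    (A_fillColumn table c mc M)[r]? =
      (M[r]?).map (fun rowl => rowl.set c.toNat
        (String.ofList (List.replicate
          ((mc - termLength (PySem.List.pyGetD (PySem.List.pyGetD table (r : Int) []) c "")).toNat) ' '))) := by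
  unfold A_fillColumn
  rw [foldl_set2 c hc
    (fun row => String.ofList (List.replicate
      ((mc - termLength (PySem.List.pyGetD (PySem.List.pyGetD table row []) c "")).toNat) ' '))
    (PySem.List.pyRange 0 (table.length : Int) 1) M r
    (fun i hi => ((PySem.List.mem_pyRange_one).mp hi).1)]
  by_cases hr : r < table.length
  · rw [if_pos ((PySem.List.mem_pyRange_one).mpr (by omega))]
  · rw [if_neg (by rw [PySem.List.mem_pyRange_one]; omega),
      List.getElem?_eq_none (by omega : M.length ≤ r)]
    simp

theorem outer_fold_getElem? (table : List (List String)) :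
    ∀ (L : List Int), (∀ c ∈ L, 0 ≤ c) →
    ∀ (M : List (List String)), M.length = table.length → ∀ (r : Nat),
      (L.foldl (fun M c => A_fillColumn table c (A_maxInColumn table c) M) M)[r]? =
        (M[r]?).map (fun rowl =>
          L.foldl (fun rw c => rw.set c.toNat (fillV table r c)) rowl) := by
  intro L
  induction L with
  | nil => intro _ M _ r; simp
  | cons c L' ih =>
    intro hL M hM r
    have hc : 0 ≤ c := hL c (by simp)
    have hL' : ∀ j ∈ L', 0 ≤ j := fun j hj => hL j (by simp [hj])
    rw [List.foldl_cons, ih hL' _ (by rw [A_fillColumn_length, hM]) r,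
      A_fillColumn_getElem? table c hc _ M hM r]
    cases M[r]? with
    | none => rfl
    | some rowl => simp [fillV, gLen]

theorem rowfold_replicate (table : List (List String)) (r : Nat) (cols : Nat) :
    ∀ n, n ≤ cols →
      (PySem.List.pyRange 0 ((n : Nat) : Int) 1).foldl
          (fun rw c => rw.set c.toNat (fillV table r c)) (List.replicate cols "") =
        List.map (fun k : Nat => fillV table r (k : Int)) (List.range n) ++
          List.replicate (cols - n) "" := by
  intro n
  induction n with
  | zero => intro _; simp [PySem.List.pyRange_one_eq_nil]
  | succ n ih =>
    intro hn
    have h1 : ((n + 1 : Nat) : Int) = (n : Int) + 1 := by push_cast; ring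
    rw [h1, PySem.List.pyRange_one_succ_right (by positivity), List.foldl_append,
      ih (by omega)]
    have hlen : (List.map (fun k : Nat => fillV table r (k : Int)) (List.range n)).length = n := by
      simp
    rw [List.foldl_cons, List.foldl_nil]
    rw [List.set_append]
    simp only [hlen]
    rw [if_neg (by omega : ¬ ((n : Int).toNat < n))]
    have htn : (n : Int).toNat = n := by omega
    rw [htn, Nat.sub_self]
    have hrep : List.replicate (cols - n) "" = "" :: List.replicate (cols - (n + 1)) "" := by
      rw [← List.replicate_succ]
      congr 1
      omega
    rw [hrep, List.set_cons_zero, List.range_succ, List.map_append]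
    simp

-- ---- B-side: per-entry value of the zip-fold of column maxima ----

theorem foldl_zipmax_length (n : Nat) :
    ∀ (rows : List (List Int)), (∀ w ∈ rows, w.length = n) →
    ∀ (mx : List Int), mx.length = n →
      (rows.foldl
          (fun mx wrow => (mx.zip wrow).map (fun mw : Int × Int => if mw.2 > mw.1 then mw.2 else mw.1))
          mx).length = n := by
  intro rows
  induction rows with
  | nil => intro _ mx hmx; simpa using hmx
  | cons w ws ih =>
    intro hlen mx hmx
    have hw : w.length = n := hlen w (by simp)
    have hws : ∀ v ∈ ws, v.length = n := fun v hv => hlen v (by simp [hv])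
    rw [List.foldl_cons]
    exact ih hws _ (by simp [List.length_zip, hmx, hw])

theorem foldl_zipmax_getElem? (n : Nat) :
    ∀ (rows : List (List Int)), (∀ w ∈ rows, w.length = n) →
    ∀ (mx : List Int), mx.length = n → ∀ k : Nat,
      (rows.foldl
          (fun mx wrow => (mx.zip wrow).map (fun mw : Int × Int => if mw.2 > mw.1 then mw.2 else mw.1))
          mx)[k]? =
        (mx[k]?).map (fun m0 => rows.foldl (fun m w => max m (w.getD k 0)) m0) := by
  intro rows
  induction rows with
  | nil => intro _ mx _ k; simp
  | cons w ws ih =>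
    intro hlen mx hmx k
    have hw : w.length = n := hlen w (by simp)
    have hws : ∀ v ∈ ws, v.length = n := fun v hv => hlen v (by simp [hv])
    have hstep : ((mx.zip w).map (fun mw : Int × Int => if mw.2 > mw.1 then mw.2 else mw.1)).length = n := by
      simp [List.length_zip, hmx, hw]
    rw [List.foldl_cons, ih hws _ hstep k]
    by_cases hk : k < n
    · have h1 : mx[k]? = some (mx[k]'(by omega)) := List.getElem?_eq_getElem (by omega)
      have h2 : ((mx.zip w).map (fun mw : Int × Int => if mw.2 > mw.1 then mw.2 else mw.1))[k]? =
          some (if (w[k]'(by omega)) > (mx[k]'(by omega)) then w[k]'(by omega) else mx[k]'(by omega)) := by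
        rw [List.getElem?_eq_getElem (by rw [hstep]; omega)]
        simp [List.getElem_zip]
      rw [h2, h1]
      simp only [Option.map_some, Option.some.injEq]
      have hgd : w.getD k 0 = w[k]'(by omega) := List.getD_eq_getElem w 0 (by omega)
      have hmax : (if (w[k]'(by omega)) > (mx[k]'(by omega)) then w[k]'(by omega) else mx[k]'(by omega)) =
          max (mx[k]'(by omega)) (w.getD k 0) := by
        rw [hgd, max_def]; split_ifs <;> omega
      rw [List.foldl_cons, hmax]
    · rw [List.getElem?_eq_none (by rw [hstep]; omega), List.getElem?_eq_none (by rw [hmx]; omega)]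
      rfl

-- ===== VERDICT (by name: the statement is the Claim_ definition above) =====
theorem get_fillers_for_table_spec : Claim_equal_get_fillers_for_table := by
  intro table _hDom _hPre
  unfold Spec_get_fillers_for_table
  match table with
  | [] => rfl
  | t0 :: rest =>
    by_cases h0 : t0 = []
    · subst h0
      simp [get_fillers_for_table, get_fillers_for_table_alt]
    · have hcols : t0.length ≠ 0 := fun h => h0 (List.eq_nil_of_length_eq_zero h)
      have hcols0 : ((t0.length : Nat) : Int) ≠ 0 := by simpa using hcols
      have hrows0 : (((t0 :: rest).length : Nat) : Int) ≠ 0 := by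
        simp only [List.length_cons]
        push_cast
        omega
      simp only [get_fillers_for_table, get_fillers_for_table_alt, PySem.List.pyGetD_zero_cons,
        if_neg h0, if_neg hrows0, if_neg hcols0]
      set widths := (t0 :: rest).map (fun row =>
        (PySem.List.pyRange 0 ((t0.length : Nat) : Int) 1).map
          (fun c => visibleLen (PySem.List.pyGetD row c ""))) with hwidths
      set maxes := widths.foldl
        (fun mx wrow => (mx.zip wrow).map (fun mw : Int × Int => if mw.2 > mw.1 then mw.2 else mw.1))
        (List.replicate t0.length (0 : Int)) with hmaxes
      have hwlen : ∀ w ∈ widths, w.length = t0.length := by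
        intro w hw
        rw [hwidths] at hw
        obtain ⟨row, _, rfl⟩ := List.mem_map.mp hw
        simp [PySem.List.length_pyRange_one]
      -- entry k of the width row of `row` is gLen row k
      have hwentry : ∀ (row : List String) (k : Nat), k < t0.length →
          ((PySem.List.pyRange 0 ((t0.length : Nat) : Int) 1).map
            (fun c => visibleLen (PySem.List.pyGetD row c ""))).getD k 0 = gLen row (k : Int) := by
        intro row k hk
        rw [List.getD_eq_getElem?_getD, List.getElem?_map,
          List.getElem?_eq_getElem (by simpa [PySem.List.length_pyRange_one] using hk)]
        simp [PySem.List.getElem_pyRange_one, gLen, visibleLen_eq_termLength]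
      have hmxlen : maxes.length = t0.length := by
        rw [hmaxes]
        exact foldl_zipmax_length t0.length widths hwlen _ (by simp)
      -- entry k of maxes is A's column maximum
      have hmxentry : ∀ k : Nat, k < t0.length →
          maxes[k]? = some (A_maxInColumn (t0 :: rest) (k : Int)) := by
        intro k hk
        rw [hmaxes, foldl_zipmax_getElem? t0.length widths hwlen _ (by simp) k,
          List.getElem?_eq_getElem (by simpa using hk)]
        simp only [List.getElem_replicate, Option.map_some, Option.some.injEq]
        rw [hwidths, List.foldl_map, A_maxInColumn_eq_foldl]
        exact (PySem.List.foldl_congr_mem _ _ _ _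
          (fun m row _ => by rw [hwentry row k hk])).symm
      apply List.ext_getElem?
      intro r
      rw [outer_fold_getElem? (t0 :: rest) _
        (fun c hcm => ((PySem.List.mem_pyRange_one).mp hcm).1) _
        (by simp [PySem.List.length_pyRange_one]) r]
      rw [List.getElem?_map, List.map_map, List.getElem?_map]
      by_cases hr : r < (t0 :: rest).length
      · rw [List.getElem?_eq_getElem
          (show r < (PySem.List.pyRange 0 (((t0 :: rest).length : Nat) : Int) 1).length by
            simpa [PySem.List.length_pyRange_one] using hr),
          List.getElem?_eq_getElem hr]
        simp only [Option.map_some, Function.comp_apply, Option.some.injEq]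
        have hzr : (PySem.List.pyRange 0 ((t0.length : Nat) : Int) 1).map
            (fun _ => ("" : String)) = List.replicate t0.length "" := by
          rw [List.map_const', PySem.List.length_pyRange_one]
          norm_num
        rw [hzr, rowfold_replicate (t0 :: rest) r t0.length t0.length le_rfl, Nat.sub_self,
          List.replicate_zero, List.append_nil]
        -- wr below abbreviates the width row of table row r
        generalize hwr : (PySem.List.pyRange 0 ((t0.length : Nat) : Int) 1).map
            (fun c => visibleLen (PySem.List.pyGetD ((t0 :: rest)[r]'hr) c "")) = wr
        have hwrmem : wr ∈ widths := by
          rw [← hwr, hwidths]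
          exact List.mem_map.mpr ⟨_, List.getElem_mem hr, rfl⟩
        have hwrlen : wr.length = t0.length := hwlen _ hwrmem
        have hwrk? : ∀ k : Nat, k < t0.length →
            wr[k]? = some (gLen ((t0 :: rest)[r]'hr) (k : Int)) := by
          intro k hk
          rw [← hwr, List.getElem?_map,
            List.getElem?_eq_getElem (by simpa [PySem.List.length_pyRange_one] using hk)]
          simp [PySem.List.getElem_pyRange_one, gLen, visibleLen_eq_termLength]
        apply List.ext_getElem?
        intro k
        rw [List.getElem?_map, List.getElem?_map]
        by_cases hk : k < t0.length
        · have hzlen : k < (maxes.zip wr).length := by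
            rw [List.length_zip, hmxlen, hwrlen]; omega
          rw [List.getElem?_eq_getElem (show k < (List.range t0.length).length by simpa using hk),
            List.getElem?_eq_getElem hzlen]
          simp only [Option.map_some, List.getElem_range, Option.some.injEq, List.getElem_zip]
          have hmx : maxes[k]'(by omega) = A_maxInColumn (t0 :: rest) (k : Int) := by
            have := hmxentry k hk
            rw [List.getElem?_eq_getElem (by omega)] at this
            exact Option.some.inj this
          have hwk : wr[k]'(by omega) = gLen ((t0 :: rest)[r]'hr) (k : Int) := by
            have := hwrk? k hk
            rw [List.getElem?_eq_getElem (by omega)] at this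
            exact Option.some.inj this
          rw [hmx, hwk]
          have hrowv : PySem.List.pyGetD (t0 :: rest) ((r : Nat) : Int) ([] : List String) =
              (t0 :: rest)[r]'hr := by
            rw [PySem.List.pyGetD_natCast]
            exact List.getD_eq_getElem _ _ hr
          simp [fillV, hrowv]
        · rw [List.getElem?_eq_none (show (List.range t0.length).length ≤ k by simpa using not_lt.mp hk),
            List.getElem?_eq_none (show (maxes.zip wr).length ≤ k by
              rw [List.length_zip, hmxlen, hwrlen]; simpa using not_lt.mp hk)]
          rfl
      · rw [List.getElem?_eq_none
          (show (PySem.List.pyRange 0 (((t0 :: rest).length : Nat) : Int) 1).length ≤ r by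
            simpa [PySem.List.length_pyRange_one] using not_lt.mp hr),
          List.getElem?_eq_none (show (t0 :: rest).length ≤ r from not_lt.mp hr)]
        rfl
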